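-- pv_equiv track=rewrite | github.com/SamirHC/dungeon-explorer | map.py | tile_list
-- ===== SOURCE A (Python) =====
-- def tile_list(tile):  # Matches Tile image for all possibilities of tile arrangements.
--     tiles = [tile]  # Stores the parameter in case there are no X's.
--     indices = []
--     for i in range(1, len(tile)):  # Stores indices of the X's in the string.
--         if tile[i] == "X":
--             indices.append(i)
--     if len(indices) != 0:
--         for d in range(2 ** (len(indices))):  # gets all possibilities of X values by counting in binary.
--             binary_string = format(d, "#0" + str(len(indices) + 2) + "b")[2:]
--             new_tile = list(tile)  # Makes the string a list.
--             for x_index in range(len(indices)):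
--                 new_tile[indices[x_index]] = binary_string[x_index]  # Replaces the X's with 1s or 0s
--             new_tile = "".join(new_tile)  # Converts list back to string
--             tiles.append(new_tile)
--         tiles = tiles[1:]  # Removes the string with the X's.
--     return tiles
-- ===== SOURCE B (Python) =====
-- def tile_list(tile):
--     # Recursive backtracking over the X-positions with one shared buffer,
--     # instead of counting in binary and re-formatting each count.
--     positions = [i for i in range(1, len(tile)) if tile[i] == "X"]
--     results = []
--     buffer = list(tile)
--
--     def rec(pos):
--         if pos == len(positions):
--             results.append("".join(buffer))
--             return
--         for bit in "01":
--             buffer[positions[pos]] = bit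
--             rec(pos + 1)
--
--     rec(0)
--     return results
-- ===== Notes on version B (the rewrite author's own statement) =====
-- stated objective: alternative
-- what changed: Replaces the flat 2^k counting loop with per-count binary formatting and index-by-index substitution by a recursive backtracking fill over the collected X-positions with one shared buffer.
import Mathlib
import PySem

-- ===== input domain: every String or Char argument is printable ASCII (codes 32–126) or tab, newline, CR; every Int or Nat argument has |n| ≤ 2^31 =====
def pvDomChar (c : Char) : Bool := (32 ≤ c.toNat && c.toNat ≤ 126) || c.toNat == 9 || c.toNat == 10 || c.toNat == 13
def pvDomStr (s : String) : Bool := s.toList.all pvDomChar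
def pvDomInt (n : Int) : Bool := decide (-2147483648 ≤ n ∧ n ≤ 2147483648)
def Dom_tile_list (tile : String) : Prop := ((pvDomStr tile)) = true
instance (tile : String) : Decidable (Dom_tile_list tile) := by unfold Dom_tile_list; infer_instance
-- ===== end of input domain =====

-- B replaces A's binary-counting-and-format loop by a recursive backtracking fill
-- over the collected X-positions (alternative decomposition, same output order).

-- ===== PORT A =====
-- Hand port of `format(d, "#0" + str(k + 2) + "b")[2:]`: the zero-padded k-digit binary
-- representation of d, most significant bit first. Exact for d < 2 ^ k, which holds for
-- every d the loop produces (d ∈ range(2 ** k)).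
def pyBinPad (d : Nat) : Nat → List Char
  | 0 => []
  | k + 1 => pyBinPad (d / 2) k ++ [if d % 2 = 1 then '1' else '0']

def tile_list (tile : String) : List String :=
  let cs := tile.toList
  let tiles : List String := [tile]
  -- for i in range(1, len(tile)): if tile[i] == "X": indices.append(i)
  -- tile[i] ported as pyGetD (total form): i is always in range here.
  let indices : List Int :=
    (PySem.List.pyRange 1 cs.length 1).foldl
      (fun acc i => if PySem.List.pyGetD cs i ' ' == 'X' then acc ++ [i] else acc) []
  if indices.length ≠ 0 then
    let tiles :=
      (List.range (2 ^ indices.length)).foldl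
        (fun ts d =>
          let binary_string := pyBinPad d indices.length
          -- for x_index in range(len(indices)): new_tile[indices[x_index]] = binary_string[x_index]
          -- the list indexings are ported as pyGetD/pySetD (total forms): always in range here.
          let new_tile :=
            (List.range indices.length).foldl
              (fun nt (j : Nat) =>
                PySem.List.pySetD nt (PySem.List.pyGetD indices (j : Int) 0)
                  (PySem.List.pyGetD binary_string (j : Int) ' ')) cs
          ts ++ [String.ofList new_tile])  -- "".join
        tiles
    tiles.drop 1  -- tiles[1:]
  else tiles

-- ===== PORT B =====
-- rec(pos): at the end of the positions append the joined buffer, else set '0' / '1' and recurse.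
def altFill : List Int → List Char → List String
  | [], buf => [String.ofList buf]
  | p :: ps, buf =>
    "01".toList.foldl (fun acc bit => acc ++ altFill ps (PySem.List.pySetD buf p bit)) []

def tile_list_alt (tile : String) : List String :=
  let cs := tile.toList
  -- positions = [i for i in range(1, len(tile)) if tile[i] == "X"]
  let positions :=
    (PySem.List.pyRange 1 cs.length 1).filter (fun i => PySem.List.pyGetD cs i ' ' == 'X')
  altFill positions cs

-- ===== PRECONDITION & SPEC =====
def Spec_tile_list (tile : String) (out : List String) : Prop := out = tile_list_alt tile
instance (tile : String) (out : List String) : Decidable (Spec_tile_list tile out) := by unfold Spec_tile_list; infer_instance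

-- ===== CLAIM (what is proved, stated in full; the proofs are below) =====
def Claim_equal_tile_list : Prop := ∀ (tile : String), Dom_tile_list tile → Spec_tile_list tile (tile_list tile)

-- ===== LEMMAS AND PROOFS =====

-- All bit strings of length k, in binary-counting order ('0' branch first, first position outermost).
def bitLists : Nat → List (List Char)
  | 0 => [[]]
  | k + 1 => (bitLists k).map ('0' :: ·) ++ (bitLists k).map ('1' :: ·)

-- Write the given bits at the given positions.
def applyBits (buf : List Char) : List Int → List Char → List Char
  | [], _ => buf
  | _ :: _, [] => buf
  | p :: ps, b :: bs => applyBits (PySem.List.pySetD buf p b) ps bs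

theorem length_pyBinPad (d k : Nat) : (pyBinPad d k).length = k := by
  induction k generalizing d with
  | zero => rfl
  | succ k ih => simp [pyBinPad, ih]

theorem pyBinPad_low {d k : Nat} (h : d < 2 ^ k) :
    pyBinPad d (k + 1) = '0' :: pyBinPad d k := by
  induction k generalizing d with
  | zero => interval_cases d; rfl
  | succ k ih =>
    have h2 : d / 2 < 2 ^ k := by omega
    show pyBinPad (d / 2) (k + 1) ++ _ = '0' :: (pyBinPad (d / 2) k ++ _)
    rw [ih h2]; rfl

theorem pyBinPad_high {d k : Nat} (h1 : 2 ^ k ≤ d) (h2 : d < 2 ^ (k + 1)) :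
    pyBinPad d (k + 1) = '1' :: pyBinPad (d - 2 ^ k) k := by
  induction k generalizing d with
  | zero =>
    have : d = 1 := by simp at h1 h2; omega
    subst this; rfl
  | succ k ih =>
    have e1 : 2 ^ k ≤ d / 2 := by omega
    have e2 : d / 2 < 2 ^ (k + 1) := by omega
    have e3 : d / 2 - 2 ^ k = (d - 2 ^ (k + 1)) / 2 := by omega
    have e4 : d % 2 = (d - 2 ^ (k + 1)) % 2 := by omega
    show pyBinPad (d / 2) (k + 1) ++ _ = '1' :: (pyBinPad ((d - 2 ^ (k + 1)) / 2) k ++ _)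
    rw [ih e1 e2, e3, e4]; rfl

theorem map_pyBinPad_range (k : Nat) :
    (List.range (2 ^ k)).map (fun d => pyBinPad d k) = bitLists k := by
  induction k with
  | zero => rfl
  | succ k ih =>
    have hsplit : (2 : Nat) ^ (k + 1) = 2 ^ k + 2 ^ k := by ring
    rw [hsplit, List.range_add, List.map_append, List.map_map,
      show bitLists (k + 1) = (bitLists k).map ('0' :: ·) ++ (bitLists k).map ('1' :: ·) from rfl]
    congr 1
    · rw [← ih, List.map_map]
      refine List.map_congr_left ?_
      intro d hd
      have : d < 2 ^ k := List.mem_range.mp hd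
      simpa using pyBinPad_low this
    · rw [← ih, List.map_map]
      refine List.map_congr_left ?_
      intro d hd
      have hd' : d < 2 ^ k := List.mem_range.mp hd
      have h1 : 2 ^ k ≤ 2 ^ k + d := by omega
      have h2 : 2 ^ k + d < 2 ^ (k + 1) := by omega
      simp only [Function.comp_apply]
      rw [pyBinPad_high h1 h2]
      simp

theorem pyGetD_cons_succ {α : Type} (x : α) (xs : List α) (j : Nat) (d : α) :
    PySem.List.pyGetD (x :: xs) ((j : Int) + 1) d = PySem.List.pyGetD xs (j : Int) d := by
  rw [show ((j : Int) + 1) = ((j + 1 : Nat) : Int) by push_cast; ring,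
    PySem.List.pyGetD_natCast, PySem.List.pyGetD_natCast, List.getD_cons_succ]

-- A's inner replacement loop is applyBits.
theorem inner_loop_eq_applyBits (ps : List Int) (bin : List Char) (cs : List Char)
    (hlen : bin.length = ps.length) :
    (List.range ps.length).foldl
      (fun nt (j : Nat) =>
        PySem.List.pySetD nt (PySem.List.pyGetD ps (j : Int) 0)
          (PySem.List.pyGetD bin (j : Int) ' ')) cs = applyBits cs ps bin := by
  induction ps generalizing bin cs with
  | nil => simp [applyBits]
  | cons p ps ih =>
    cases bin with
    | nil => simp at hlen
    | cons b bs =>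
      have hb : bs.length = ps.length := by simpa using hlen
      rw [List.length_cons, List.range_succ_eq_map, List.foldl_cons, List.foldl_map]
      rw [show applyBits cs (p :: ps) (b :: bs)
            = applyBits (PySem.List.pySetD cs p b) ps bs from rfl, ← ih bs _ hb]
      have hinit : PySem.List.pySetD cs (PySem.List.pyGetD (p :: ps) ((0 : Nat) : Int) 0)
          (PySem.List.pyGetD (b :: bs) ((0 : Nat) : Int) ' ') = PySem.List.pySetD cs p b := by
        simp
      rw [hinit]
      apply PySem.List.foldl_congr_mem
      intro acc j _
      simp only [Nat.succ_eq_add_one, Nat.cast_add, Nat.cast_one, pyGetD_cons_succ]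

-- B's recursion enumerates bitLists in order.
theorem altFill_eq_map (ps : List Int) (cs : List Char) :
    altFill ps cs = (bitLists ps.length).map (fun bs => String.ofList (applyBits cs ps bs)) := by
  induction ps generalizing cs with
  | nil => rfl
  | cons p ps ih =>
    show ([] ++ altFill ps (PySem.List.pySetD cs p '0')) ++ altFill ps (PySem.List.pySetD cs p '1') = _
    simp only [List.length_cons]
    rw [List.nil_append, ih, ih,
      show bitLists (ps.length + 1)
        = (bitLists ps.length).map ('0' :: ·) ++ (bitLists ps.length).map ('1' :: ·) from rfl,
      List.map_append, List.map_map, List.map_map]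
    rfl

-- A's main branch produces exactly B's recursion.
theorem a_main_eq_altFill (ps : List Int) (cs : List Char) (t0 : String) :
    ((List.range (2 ^ ps.length)).foldl
      (fun ts d =>
        ts ++ [String.ofList ((List.range ps.length).foldl
          (fun nt (j : Nat) =>
            PySem.List.pySetD nt (PySem.List.pyGetD ps (j : Int) 0)
              (PySem.List.pyGetD (pyBinPad d ps.length) (j : Int) ' ')) cs)])
      [t0]).drop 1 = altFill ps cs := by
  rw [PySem.List.foldl_append_singleton_eq_map, altFill_eq_map, List.drop_left' (by simp)]
  rw [show (fun d => String.ofList ((List.range ps.length).foldl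
        (fun nt (j : Nat) =>
          PySem.List.pySetD nt (PySem.List.pyGetD ps (j : Int) 0)
            (PySem.List.pyGetD (pyBinPad d ps.length) (j : Int) ' ')) cs))
      = (fun d => String.ofList (applyBits cs ps (pyBinPad d ps.length))) from
    funext fun d => congrArg _ (inner_loop_eq_applyBits ps _ cs (length_pyBinPad d ps.length))]
  rw [← map_pyBinPad_range ps.length, List.map_map]
  rfl

-- ===== VERDICT (by name: the statement is the Claim_ definition above) =====
theorem tile_list_spec : Claim_equal_tile_list := by
  intro tile _
  show tile_list tile = tile_list_alt tile
  unfold tile_list tile_list_alt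
  simp only [PySem.List.foldl_append_if, List.nil_append, List.map_id']
  by_cases hnil : (PySem.List.pyRange 1 (tile.toList.length) 1).filter
      (fun i => PySem.List.pyGetD tile.toList i ' ' == 'X') = []
  · rw [hnil]
    simp [altFill, String.ofList_toList]
  · have hlen : ((PySem.List.pyRange 1 (tile.toList.length) 1).filter
        (fun i => PySem.List.pyGetD tile.toList i ' ' == 'X')).length ≠ 0 := by
      simpa using hnil
    rw [if_pos hlen]
    exact a_main_eq_altFill _ _ _
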